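/-
  THE ONE HYPOTHESIS ABOUT THE PROCESSOR that a proof about the stb_vorbis image carries.

      UserX.MicroOK μ            μ follows Intel's manual, its two answers to "whose manual" agree, it enumerates SSE and SSE2
      MicroOK.sseMicro           … gives `User.SseMicro μ`, what the SSE rules of UserX/Sse.lean ask (both vendor spellings, SSE, SSE2)
      MicroOK.vendor             … gives `μ.vendor = .intel`, the rewrite fact the integer steps need (`u_step … [hμ.vendor]`)
      microOK_interp             NON-VACUITY: the processor record every interpreter of the tree runs with meets it

  A proof takes `(hμ : UserX.MicroOK μ)` ONCE. The stepping tactics find it in the context (`u_sse_micro` below closes a goal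
  `SseMicro μ` from a hypothesis `MicroOK μ` or `SseMicro μ`); `Vorbis.MicroOK` (Vorbis/Statement.lean) is this structure.

  NOT in the bundle, because no executed instruction of the image asks it: the processor's family (the multi-byte NOP `0F 1F /0`
  leaves `μ.cfg.field Feature.familyId = 6 ∨ … = 15`; the image has it only as padding between functions), the BSF / BSR and
  CMPXCHG implementation choices.
-/
import UserX.SseBase
import UserX.SseStart
import X86.Derived.Sem.Coherent
namespace UserX
open X86 X86.User

/-- **What a proof assumes of the processor record `μ`.** The four fields are independent of each other in `Microarch`;
`Microarch.ofConfig` (what every interpreter runs with) ties the two vendor fields together. -/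
structure MicroOK (μ : Microarch) : Prop where
  /-- the bodies switch on `μ.vendor`: Intel's manual -/
  vendor : μ.vendor = .intel
  /-- `μ.vendor = μ.cfg.vendor`: the helpers that read the configuration record see the same vendor -/
  coherent : μ.Coherent
  /-- CPUID.01H:EDX.SSE on the static table of `μ` (the gates `requireFeatures` / `requireSimd` ask it) -/
  sse : μ.cfg.has Feature.sse = true
  /-- CPUID.01H:EDX.SSE2 on the static table of `μ` -/
  sse2 : μ.cfg.has Feature.sse2 = true

namespace MicroOK
variable {μ : Microarch}

/-- The vendor as the configuration record spells it. -/
theorem cfgVendor (h : MicroOK μ) : μ.cfg.vendor = .intel :=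
  h.coherent.cfg_vendor_eq h.vendor

/-- **The bundle gives what the SSE rules ask of `μ`.** -/
theorem sseMicro (h : MicroOK μ) : SseMicro μ where
  vendor := h.vendor
  cfgVendor := h.cfgVendor
  sse := h.sse
  sse2 := h.sse2

/-- The bundle from its SSE part and coherence (for a client that was handed `SseMicro μ`). -/
theorem of_sseMicro (h : SseMicro μ) (hc : μ.Coherent) : MicroOK μ where
  vendor := h.vendor
  coherent := hc
  sse := h.sse
  sse2 := h.sse2

end MicroOK

/-- **NON-VACUITY: the interpreter's processor meets the bundle.** `Microarch.ofConfig Interp.interpConfig` is the record every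
interpreter of the tree runs with. Vendor and coherence hold by construction of `ofConfig`; the two CPUID bits are
`User.sseMicro_interp` (UserX/SseStart.lean), which reads them off `User.boot_features` — the model's fold invariant over the
HashMap-backed CPUID index (X86/Derived/User/Start.lean: `indexedCpuid_eq`), because `decide` cannot evaluate the hash. -/
theorem microOK_interp : MicroOK (Microarch.ofConfig Interp.interpConfig) where
  vendor := sseMicro_interp.vendor
  coherent := Microarch.ofConfig_coherent Interp.interpConfig
  sse := sseMicro_interp.sse
  sse2 := sseMicro_interp.sse2

end UserX

/-- `u_sse_micro`: close a goal `SseMicro μ` from the context — a hypothesis `SseMicro μ`, or the bundle `UserX.MicroOK μ`. -/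
syntax "u_sse_micro" : tactic
macro_rules
  | `(tactic| u_sse_micro) => `(tactic| first
    | (with_reducible assumption)
    | exact UserX.MicroOK.sseMicro (by with_reducible assumption)
    | fail "u_sse_micro: no hypothesis `UserX.MicroOK μ` or `SseMicro μ` in the context")
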